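-- pv_equiv track=rewrite | github.com/openvax/mhcdouble | mhc2/assembly.py | add_sequences_not_contained
-- ===== SOURCE A (Python) =====
-- def add_sequences_not_contained(new_sequences, previous_sequences):
--     """
--     If any of the previous iteration's sequences aren't contained in
--     assembled "new" sequences, then add them to the result set.
--     """
--     combined_sequences = set(new_sequences)
--     for s in previous_sequences:
--         found_containing_seq = False
--         for t in new_sequences:
--             if s in t:
--                 found_containing_seq = True
--                 break
--         if not found_containing_seq:
--             combined_sequences.add(s)
--     return combined_sequences
-- ===== SOURCE B (Python) =====
-- def add_sequences_not_contained(new_sequences, previous_sequences):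
--     """
--     Same result as A, computed differently: enumerate every substring of the
--     new sequences ONCE into a hash set, so each previous sequence is decided
--     by a single set lookup instead of a scan over all new sequences.
--     """
--     substrings = set()
--     for t in new_sequences:
--         n = len(t)
--         for i in range(n + 1):
--             for j in range(i, n + 1):
--                 substrings.add(t[i:j])
--     combined = set(new_sequences)
--     for s in previous_sequences:
--         if s not in substrings:
--             combined.add(s)
--     return combined
-- ===== Notes on version B (the rewrite author's own statement) =====
-- stated objective: faster
-- what changed: The per-previous-sequence inner scan over new_sequences is replaced by one precomputed hash set of all substrings of the new sequences, so each previous sequence is decided by a single O(1) set lookup; the inner containment loop disappears.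
import Mathlib
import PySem

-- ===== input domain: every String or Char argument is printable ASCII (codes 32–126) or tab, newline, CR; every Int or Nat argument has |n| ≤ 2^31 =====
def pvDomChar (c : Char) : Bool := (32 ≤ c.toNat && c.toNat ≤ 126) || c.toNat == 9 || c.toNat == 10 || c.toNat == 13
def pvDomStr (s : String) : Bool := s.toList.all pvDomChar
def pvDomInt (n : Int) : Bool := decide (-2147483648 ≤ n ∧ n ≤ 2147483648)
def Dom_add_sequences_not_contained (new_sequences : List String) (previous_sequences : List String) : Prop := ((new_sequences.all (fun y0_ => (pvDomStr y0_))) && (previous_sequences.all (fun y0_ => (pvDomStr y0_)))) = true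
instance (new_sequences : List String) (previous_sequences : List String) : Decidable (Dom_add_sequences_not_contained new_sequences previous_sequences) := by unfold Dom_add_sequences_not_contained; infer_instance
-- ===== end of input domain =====

-- B replaces A's per-previous-sequence scan over new_sequences by one precomputed set of
-- all substrings of the new sequences (one lookup per previous sequence); objective: faster (measured).

-- ===== PORT A =====
-- inner 'for t in new_sequences: if s in t: found = True; break'
def pvFindContaining (s : String) : List String → Bool
  | [] => false
  | t :: rest => if PySem.Str.isIn s t then true else pvFindContaining s rest

def add_sequences_not_contained (new_sequences : List String) (previous_sequences : List String) : List String :=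
  previous_sequences.foldl
    (fun combined s =>
      if pvFindContaining s new_sequences then combined else PySem.Set.add combined s)
    (PySem.Set.ofList new_sequences)

-- ===== PORT B =====
def add_sequences_not_contained_alt (new_sequences : List String) (previous_sequences : List String) : List String :=
  let substrings : PySem.Set String :=
    new_sequences.foldl
      (fun subs t =>
        (PySem.List.pyRange 0 (PySem.Str.len t + 1)).foldl
          (fun subs i =>
            (PySem.List.pyRange i (PySem.Str.len t + 1)).foldl
              (fun subs j => PySem.Set.add subs (PySem.Str.slice t (some i) (some j)))
              subs)
          subs)
      PySem.Set.empty
  previous_sequences.foldl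
    (fun combined s =>
      if PySem.Set.contains substrings s then combined else PySem.Set.add combined s)
    (PySem.Set.ofList new_sequences)

-- ===== PRECONDITION & SPEC =====
def Spec_add_sequences_not_contained (new_sequences : List String) (previous_sequences : List String) (out : List String) : Prop := out = add_sequences_not_contained_alt new_sequences previous_sequences
instance (new_sequences : List String) (previous_sequences : List String) (out : List String) : Decidable (Spec_add_sequences_not_contained new_sequences previous_sequences out) := by unfold Spec_add_sequences_not_contained; infer_instance

-- ===== CLAIM (what is proved, stated in full; the proofs are below) =====
def Claim_equal_add_sequences_not_contained : Prop := ∀ (new_sequences : List String) (previous_sequences : List String), Dom_add_sequences_not_contained new_sequences previous_sequences → Spec_add_sequences_not_contained new_sequences previous_sequences (add_sequences_not_contained new_sequences previous_sequences)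

-- ===== LEMMAS AND PROOFS =====

-- membership through a fold of conditional-adds, for any per-step membership description P
theorem pv_mem_foldl_acc {β : Type} (l : List β) (F : PySem.Set String → β → PySem.Set String)
    (P : β → String → Prop)
    (h : ∀ (s : PySem.Set String) (b : β) (x : String), x ∈ F s b ↔ x ∈ s ∨ P b x)
    (init : PySem.Set String) (x : String) :
    x ∈ l.foldl F init ↔ x ∈ init ∨ ∃ b ∈ l, P b x := by
  induction l generalizing init with
  | nil => simp
  | cons b rest ih =>
    simp only [List.foldl_cons, ih, h, List.mem_cons]
    constructor
    · rintro ((hx | hp) | ⟨c, hc, hpc⟩)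
      · exact Or.inl hx
      · exact Or.inr ⟨b, Or.inl rfl, hp⟩
      · exact Or.inr ⟨c, Or.inr hc, hpc⟩
    · rintro (hx | ⟨c, (rfl | hc), hpc⟩)
      · exact Or.inl (Or.inl hx)
      · exact Or.inl (Or.inr hpc)
      · exact Or.inr ⟨c, hc, hpc⟩

-- the slices t[i:j] over 0 ≤ i ≤ j ≤ len(t) are exactly the substrings of t
theorem pv_exists_slice_iff (t s : String) :
    (∃ i ∈ PySem.List.pyRange 0 (PySem.Str.len t + 1),
      ∃ j ∈ PySem.List.pyRange i (PySem.Str.len t + 1),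
        s = PySem.Str.slice t (some i) (some j))
    ↔ PySem.Str.isIn s t = true := by
  rw [PySem.Str.isIn_iff_infix]
  constructor
  · rintro ⟨i, hi, j, hj, rfl⟩
    rw [PySem.List.mem_pyRange_one] at hi hj
    obtain ⟨a, rfl⟩ : ∃ a : Nat, i = (a : Int) := ⟨i.toNat, (Int.toNat_of_nonneg hi.1).symm⟩
    obtain ⟨b, rfl⟩ : ∃ b : Nat, j = (b : Int) := ⟨j.toNat, (Int.toNat_of_nonneg (le_trans hi.1 hj.1)).symm⟩
    rw [PySem.Str.toList_slice, PySem.Chars.slice_eq_listSlice, PySem.List.slice_natCast]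
    exact ((List.take_prefix (b - a) (t.toList.drop a)).isInfix).trans
      ((List.drop_suffix a t.toList).isInfix)
  · rintro ⟨p, q, hpq⟩
    have hlen : PySem.Str.len t = (t.toList.length : Int) := by
      simp [PySem.Str.len_eq]
    have hle : p.length + s.toList.length ≤ t.toList.length := by
      rw [← hpq]; simp
    refine ⟨(p.length : Int), ?_, ((p.length + s.toList.length : Nat) : Int), ?_, ?_⟩
    · rw [PySem.List.mem_pyRange_one, hlen]
      omega
    · rw [PySem.List.mem_pyRange_one, hlen]
      push_cast [hle]
      omega
    · symm
      apply String.toList_inj.mp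
      rw [PySem.Str.toList_slice, PySem.Chars.slice_eq_listSlice, PySem.List.slice_natCast]
      rw [← hpq]
      simp

-- the break-loop of A is List.any
theorem pv_findContaining_eq_any (s : String) (l : List String) :
    pvFindContaining s l = l.any (fun t => PySem.Str.isIn s t) := by
  induction l with
  | nil => rfl
  | cons t rest ih =>
    rw [pvFindContaining, List.any_cons, ih]
    cases PySem.Str.isIn s t <;> simp

-- B's precomputed set contains exactly what A's inner loop searches for
theorem pv_contains_substrings (new_sequences : List String) (s : String) :
    PySem.Set.contains
      (new_sequences.foldl
        (fun subs t =>
          (PySem.List.pyRange 0 (PySem.Str.len t + 1)).foldl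
            (fun subs i =>
              (PySem.List.pyRange i (PySem.Str.len t + 1)).foldl
                (fun subs j => PySem.Set.add subs (PySem.Str.slice t (some i) (some j)))
                subs)
            subs)
        PySem.Set.empty) s
    = pvFindContaining s new_sequences := by
  have h3 : ∀ (t : String) (i : Int) (subs : PySem.Set String) (x : String),
      x ∈ (PySem.List.pyRange i (PySem.Str.len t + 1)).foldl
            (fun subs j => PySem.Set.add subs (PySem.Str.slice t (some i) (some j))) subs
      ↔ x ∈ subs ∨ ∃ j ∈ PySem.List.pyRange i (PySem.Str.len t + 1),
          x = PySem.Str.slice t (some i) (some j) :=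
    fun t i subs x => pv_mem_foldl_acc _ _ _
      (fun s' j x' => PySem.Set.mem_add s' (PySem.Str.slice t (some i) (some j)) x') subs x
  have h2 : ∀ (t : String) (subs : PySem.Set String) (x : String),
      x ∈ (PySem.List.pyRange 0 (PySem.Str.len t + 1)).foldl
            (fun subs i =>
              (PySem.List.pyRange i (PySem.Str.len t + 1)).foldl
                (fun subs j => PySem.Set.add subs (PySem.Str.slice t (some i) (some j)))
                subs) subs
      ↔ x ∈ subs ∨ ∃ i ∈ PySem.List.pyRange 0 (PySem.Str.len t + 1),
          ∃ j ∈ PySem.List.pyRange i (PySem.Str.len t + 1),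
            x = PySem.Str.slice t (some i) (some j) :=
    fun t subs x => pv_mem_foldl_acc _ _ _ (fun s' i x' => h3 t i s' x') subs x
  have h1 : s ∈ (new_sequences.foldl
        (fun subs t =>
          (PySem.List.pyRange 0 (PySem.Str.len t + 1)).foldl
            (fun subs i =>
              (PySem.List.pyRange i (PySem.Str.len t + 1)).foldl
                (fun subs j => PySem.Set.add subs (PySem.Str.slice t (some i) (some j)))
                subs)
            subs)
        PySem.Set.empty)
      ↔ ∃ t ∈ new_sequences, ∃ i ∈ PySem.List.pyRange 0 (PySem.Str.len t + 1),
          ∃ j ∈ PySem.List.pyRange i (PySem.Str.len t + 1),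
            s = PySem.Str.slice t (some i) (some j) := by
    rw [pv_mem_foldl_acc _ _ _ (fun s' t x' => h2 t s' x') PySem.Set.empty s]
    simp [PySem.Set.empty]
  have hbool : ∀ (b c : Bool), (b = true ↔ c = true) → b = c := by decide
  apply hbool
  rw [pv_findContaining_eq_any, PySem.Set.contains_iff, h1, List.any_eq_true]
  constructor
  · rintro ⟨t, ht, hrest⟩
    exact ⟨t, ht, (pv_exists_slice_iff t s).mp hrest⟩
  · rintro ⟨t, ht, hin⟩
    exact ⟨t, ht, (pv_exists_slice_iff t s).mpr hin⟩

-- ===== VERDICT (by name: the statement is the Claim_ definition above) =====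
theorem add_sequences_not_contained_spec : Claim_equal_add_sequences_not_contained := by
  intro new_sequences previous_sequences _
  unfold Spec_add_sequences_not_contained add_sequences_not_contained add_sequences_not_contained_alt
  congr 1
  funext combined s
  rw [pv_contains_substrings]
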